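-- pv_equiv track=rewrite | github.com/bereamk/AdventOfCode | AOC_24/Python/D2_2.py | is_unsafe
-- ===== SOURCE A (Python) =====
-- def is_unsafe(ranges):  # Determines if a report is unsafe based on given criteria.
--     if not ranges:
--         return "\n    - Invalid input."
--     if not (all(r <= 0 for r in ranges) or all(r >= 0 for r in ranges)):
--         return "\n    - Values are not all positive or negative."
--     if any(abs(r) > 3 for r in ranges):
--         return "\n    - Difference between levels exceeds 3."
--     if 0 in ranges:
--         return "\n    - Difference between levels is 0."
--     return None
-- ===== SOURCE B (Python) =====
-- def is_unsafe(ranges):  # single-pass flag accumulation instead of four separate scans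
--     if not ranges:
--         return "\n    - Invalid input."
--     has_pos = has_neg = has_zero = False
--     max_abs = 0
--     for r in ranges:
--         if r > 0:
--             has_pos = True
--         elif r < 0:
--             has_neg = True
--         else:
--             has_zero = True
--         a = -r if r < 0 else r
--         if a > max_abs:
--             max_abs = a
--     if has_pos and has_neg:
--         return "\n    - Values are not all positive or negative."
--     if max_abs > 3:
--         return "\n    - Difference between levels exceeds 3."
--     if has_zero:
--         return "\n    - Difference between levels is 0."
--     return None
-- ===== Notes on version B (the rewrite author's own statement) =====
-- stated objective: alternative
-- what changed: Replaces A's four separate list scans (two all-comprehensions, an any-comprehension and a membership test) with one loop accumulating sign/zero flags and the maximum absolute value, then decides from the flags in the same priority order.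
import Mathlib
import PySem

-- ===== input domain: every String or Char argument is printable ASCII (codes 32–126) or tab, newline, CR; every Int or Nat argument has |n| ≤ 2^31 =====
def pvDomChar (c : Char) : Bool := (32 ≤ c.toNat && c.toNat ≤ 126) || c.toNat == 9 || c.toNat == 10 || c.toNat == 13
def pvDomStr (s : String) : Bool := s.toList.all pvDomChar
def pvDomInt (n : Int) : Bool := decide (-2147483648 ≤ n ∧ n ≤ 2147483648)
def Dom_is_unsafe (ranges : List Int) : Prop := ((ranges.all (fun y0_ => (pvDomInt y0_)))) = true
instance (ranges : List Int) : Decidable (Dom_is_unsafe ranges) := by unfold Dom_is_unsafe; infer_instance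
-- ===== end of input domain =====

-- B replaces A's four separate scans by one loop accumulating sign/zero flags and the max absolute value (objective: alternative decomposition).

-- ===== PORT A =====
def is_unsafe (ranges : List Int) : Option String :=
  if ranges = [] then some "\n    - Invalid input."
  else if ¬ (ranges.all (fun r => r ≤ 0) || ranges.all (fun r => 0 ≤ r)) then
    some "\n    - Values are not all positive or negative."
  else if ranges.any (fun r => 3 < |r|) then
    some "\n    - Difference between levels exceeds 3."
  else if (0 : Int) ∈ ranges then
    some "\n    - Difference between levels is 0."
  else none

-- ===== PORT B =====
-- one loop step: update (has_pos, has_neg, has_zero, max_abs)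
def is_unsafe_step (st : Bool × Bool × Bool × Int) (r : Int) : Bool × Bool × Bool × Int :=
  let st' :=
    if 0 < r then (true, st.2.1, st.2.2.1, st.2.2.2)
    else if r < 0 then (st.1, true, st.2.2.1, st.2.2.2)
    else (st.1, st.2.1, true, st.2.2.2)
  let a := if r < 0 then -r else r
  if st'.2.2.2 < a then (st'.1, st'.2.1, st'.2.2.1, a) else st'

def is_unsafe_alt (ranges : List Int) : Option String :=
  if ranges = [] then some "\n    - Invalid input."
  else
    let st := ranges.foldl is_unsafe_step (false, false, false, 0)
    if st.1 && st.2.1 then some "\n    - Values are not all positive or negative."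
    else if 3 < st.2.2.2 then some "\n    - Difference between levels exceeds 3."
    else if st.2.2.1 then some "\n    - Difference between levels is 0."
    else none

-- ===== PRECONDITION & SPEC =====
def Spec_is_unsafe (ranges : List Int) (out : Option String) : Prop := out = is_unsafe_alt ranges
instance (ranges : List Int) (out : Option String) : Decidable (Spec_is_unsafe ranges out) := by unfold Spec_is_unsafe; infer_instance

-- ===== CLAIM (what is proved, stated in full; the proofs are below) =====
def Claim_equal_is_unsafe : Prop := ∀ (ranges : List Int), Dom_is_unsafe ranges → Spec_is_unsafe ranges (is_unsafe ranges)

-- ===== LEMMAS AND PROOFS =====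

-- one step of B's loop, in closed form (needs a nonnegative running max)
theorem is_unsafe_step_eq (p n z : Bool) (m x : Int) (hm : 0 ≤ m) :
    is_unsafe_step (p, n, z, m) x =
      (p || decide (0 < x), n || decide (x < 0), z || decide (x = 0), max m |x|) := by
  unfold is_unsafe_step
  rcases lt_trichotomy x 0 with h | h | h
  · simp only [if_neg (by omega : ¬ 0 < x), if_pos h]
    by_cases h2 : m < -x
    · simp [if_pos h2, h, abs_of_neg h, max_eq_right (le_of_lt h2), show ¬ 0 < x by omega,
        show x ≠ 0 by omega]
    · simp [if_neg h2, h, abs_of_neg h, max_eq_left (not_lt.mp h2), show ¬ 0 < x by omega,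
        show x ≠ 0 by omega]
  · subst h
    simp [hm, not_lt.mpr hm]
  · simp only [if_pos h]
    by_cases h2 : m < x
    · simp [if_pos h2, h, abs_of_pos h, max_eq_right (le_of_lt h2), show ¬ x < 0 by omega,
        show x ≠ 0 by omega]
    · simp [if_neg h2, h, abs_of_pos h, max_eq_left (not_lt.mp h2), show ¬ x < 0 by omega,
        show x ≠ 0 by omega]

-- characterisation of the whole fold
theorem is_unsafe_fold_char (xs : List Int) (p n z : Bool) (m : Int) (hm : 0 ≤ m) :
    xs.foldl is_unsafe_step (p, n, z, m) =
      (p || xs.any (fun r => 0 < r), n || xs.any (fun r => r < 0),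
       z || xs.any (fun r => r = 0), xs.foldl (fun acc r => max acc |r|) m) := by
  induction xs generalizing p n z m with
  | nil => simp
  | cons x xs ih =>
    rw [List.foldl_cons, is_unsafe_step_eq p n z m x hm,
      ih _ _ _ _ (le_trans hm (le_max_left _ _))]
    simp [Bool.or_assoc]

theorem foldl_max_abs_gt3 (xs : List Int) :
    (3 < xs.foldl (fun acc r => max acc |r|) 0) ↔ xs.any (fun r => 3 < |r|) := by
  have key : ∀ (xs : List Int) (m : Int), (3 < xs.foldl (fun acc r => max acc |r|) m) ↔
      (3 < m ∨ xs.any (fun r => 3 < |r|) = true) := by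
    intro xs
    induction xs with
    | nil => simp
    | cons x xs ih =>
      intro m
      simp only [List.foldl_cons, List.any_cons, ih, lt_max_iff, Bool.or_eq_true,
        decide_eq_true_eq]
      tauto
  rw [key]
  constructor
  · rintro (h | h)
    · exact absurd h (by omega)
    · exact h
  · intro h; exact Or.inr h

-- ===== VERDICT (by name: the statement is the Claim_ definition above) =====
theorem is_unsafe_spec : Claim_equal_is_unsafe := by
  intro ranges _
  unfold Spec_is_unsafe is_unsafe is_unsafe_alt
  by_cases hnil : ranges = []
  · simp [hnil]
  · simp only [if_neg hnil]
    rw [is_unsafe_fold_char ranges false false false 0 le_rfl]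
    simp only [Bool.false_or]
    have hsign : (¬ (ranges.all (fun r => r ≤ 0) || ranges.all (fun r => 0 ≤ r)) = true) ↔
        ((ranges.any (fun r => 0 < r) && ranges.any (fun r => r < 0)) = true) := by
      simp only [Bool.or_eq_true, Bool.and_eq_true, List.all_eq_true, List.any_eq_true,
        decide_eq_true_eq, not_or]
      constructor
      · rintro ⟨h1, h2⟩
        push Not at h1 h2
        obtain ⟨a, ha, ha'⟩ := h1
        obtain ⟨b, hb, hb'⟩ := h2
        exact ⟨⟨a, ha, by omega⟩, ⟨b, hb, by omega⟩⟩
      · rintro ⟨⟨a, ha, ha'⟩, ⟨b, hb, hb'⟩⟩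
        constructor
        · intro h; have := h a ha; omega
        · intro h; have := h b hb; omega
    have hzero : ((0 : Int) ∈ ranges) ↔ (ranges.any (fun r => r = 0) = true) := by
      simp only [List.any_eq_true, decide_eq_true_eq]
      exact ⟨fun h => ⟨0, h, rfl⟩, fun ⟨b, hb, e⟩ => e ▸ hb⟩
    by_cases hs : (ranges.any (fun r => 0 < r) && ranges.any (fun r => r < 0)) = true
    · rw [if_pos (by simpa [hsign] using hs), if_pos hs]
    · rw [if_neg (fun h => hs ((hsign).mp (by simpa using h))), if_neg hs]
      by_cases h3 : ranges.any (fun r => 3 < |r|) = true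
      · rw [if_pos h3, if_pos ((foldl_max_abs_gt3 ranges).mpr h3)]
      · rw [if_neg h3, if_neg (fun h => h3 ((foldl_max_abs_gt3 ranges).mp h))]
        by_cases hz : (0 : Int) ∈ ranges
        · rw [if_pos hz, if_pos (hzero.mp hz)]
        · rw [if_neg hz, if_neg (fun h => hz (hzero.mpr h))]
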